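-- pv_equiv track=rewrite | github.com/S-Roomi/CMSC-201 | Project1/p1.py | list_all_times_checked_in
-- ===== SOURCE A (Python) =====
-- def list_all_times_checked_in(attendData):
--     """
--     This function returns a list of when all student(s) FIRST swipe in.
--     :param attendData: List of all swipe data
--     :return: list of students when they first swipe in
--     """
--     list_of_names = []
--     list_of_timestamps = []
--     list_of_dates = []
--     list_of_results = []
--
--     #these 3 for loops seperates the information from attendData into 3 list, last+first name, time, and date
--     for names in attendData:
--         new_list = names.split(", ")
--         new_list = ", ".join(new_list[:2])
--         list_of_names.append(new_list)
--
--     for timestamps in attendData: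
--         new_list = timestamps.split(", ")
--         new_list = new_list[2:3]
--         list_of_timestamps.append(new_list)
--
--     for dates in attendData:
--         new_list = dates.split(", ")
--         new_list = ", ".join(new_list[3:])
--         list_of_dates.append(new_list)
--
--     list_of_indexes = []
--     list_of_already_found = []
--     count = 0
--     for name in list_of_names:
--         #if the name from list_of_names is not already in list_of_already_found, add it and add the index of it to list_of_indexes
--         if name not in list_of_already_found:
--             list_of_already_found.append(name)
--             list_of_indexes.append(count)
--         count += 1
--     #combine and append the information that was provided by list_of_indexes
--     for i in list_of_indexes:
--         a = f"{list_of_names[i]}, {list_of_timestamps[i]}, {list_of_dates[i]}"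
--         list_of_results.append(a)
--
--     return list_of_results
-- ===== SOURCE B (Python) =====
-- def list_all_times_checked_in(attendData):
--     """
--     This function returns a list of when all student(s) FIRST swipe in.
--     :param attendData: List of all swipe data
--     :return: list of students when they first swipe in
--     """
--     seen = set()
--     results = []
--     for line in attendData:
--         parts = line.split(", ")
--         name = ", ".join(parts[:2])
--         if name not in seen:
--             seen.add(name)
--             results.append(f"{name}, {parts[2:3]}, {', '.join(parts[3:])}")
--     return results
-- ===== Notes on version B (the rewrite author's own statement) =====
-- stated objective: simpler
-- what changed: B does a single pass with a seen-names set, assembling each first-swipe string inline, instead of A's five passes (three parallel lists, an index-collection pass with a linear membership list, and a final assembly-by-index pass).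
import Mathlib
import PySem

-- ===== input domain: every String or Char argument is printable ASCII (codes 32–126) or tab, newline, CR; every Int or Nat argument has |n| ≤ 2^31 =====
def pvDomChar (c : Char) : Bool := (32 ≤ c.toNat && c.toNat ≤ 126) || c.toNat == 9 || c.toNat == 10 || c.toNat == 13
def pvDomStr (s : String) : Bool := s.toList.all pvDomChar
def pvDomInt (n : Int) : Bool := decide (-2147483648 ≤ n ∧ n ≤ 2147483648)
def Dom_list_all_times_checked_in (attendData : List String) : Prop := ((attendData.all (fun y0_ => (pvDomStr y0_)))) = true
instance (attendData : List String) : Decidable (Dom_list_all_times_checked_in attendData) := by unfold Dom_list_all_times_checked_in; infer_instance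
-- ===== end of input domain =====

-- B replaces A's five list passes by one pass with a seen-names set that assembles each
-- first-swipe string inline (objective: simpler).


-- ===== PORT A =====
-- Shared helper: hand port of Python's repr of a str, as produced by the f-string
-- "{<list of str>}" both Pythons contain; exact on the domain's characters
-- (printable ASCII plus tab/newline/CR): the quote is ' unless the string contains '
-- and no "; backslash, the quote char and \n \r \t are escaped, the rest is literal.
def pvReprEscape (q : Char) (cs : List Char) : List Char :=
  cs.flatMap (fun c =>
    if c = '\\' then ['\\', '\\']
    else if c = q then ['\\', q]
    else if c = '\n' then ['\\', 'n']
    else if c = '\r' then ['\\', 'r']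
    else if c = '\t' then ['\\', 't']
    else [c])

def pvReprStr (s : String) : String :=
  let cs := s.toList
  let q : Char := if cs.contains '\'' && !cs.contains '"' then '"' else '\''
  String.ofList (q :: (pvReprEscape q cs ++ [q]))

-- Python's repr of a list of str: '[' + ', '.join(map(repr, xs)) + ']'
def pyReprStrList (xs : List String) : String :=
  "[" ++ PySem.Str.join ", " (xs.map pvReprStr) ++ "]"

-- Port of A: three parallel per-line passes, then the first-occurrence-index pass,
-- then assembly by index.  s.split(", ") has a nonempty separator, so split? is never
-- none and .getD [] is exact; the indexes collected are list positions, in range by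
-- construction, so pyGetD (= xs[i] with a default) is exact here.
def list_all_times_checked_in (attendData : List String) : List String :=
  let list_of_names := attendData.foldl (fun acc names =>
    acc ++ [PySem.Str.join ", " (PySem.List.slice ((PySem.Str.split? names ", ").getD []) none (some 2))]) []
  let list_of_timestamps := attendData.foldl (fun acc timestamps =>
    acc ++ [PySem.List.slice ((PySem.Str.split? timestamps ", ").getD []) (some 2) (some 3)]) []
  let list_of_dates := attendData.foldl (fun acc dates =>
    acc ++ [PySem.Str.join ", " (PySem.List.slice ((PySem.Str.split? dates ", ").getD []) (some 3) none)]) []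
  let st := list_of_names.foldl (fun (st : List Int × List String × Int) name =>
    if name ∈ st.2.1 then (st.1, st.2.1, st.2.2 + 1)
    else (st.1 ++ [st.2.2], st.2.1 ++ [name], st.2.2 + 1)) ([], [], 0)
  st.1.foldl (fun acc i =>
    acc ++ [PySem.List.pyGetD list_of_names i "" ++ ", "
      ++ pyReprStrList (PySem.List.pyGetD list_of_timestamps i []) ++ ", "
      ++ PySem.List.pyGetD list_of_dates i ""]) []

-- ===== PORT B =====
def list_all_times_checked_in_alt (attendData : List String) : List String :=
  (attendData.foldl (fun (st : PySem.Set String × List String) line =>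
    let parts := (PySem.Str.split? line ", ").getD []
    let name := PySem.Str.join ", " (PySem.List.slice parts none (some 2))
    if PySem.Set.contains st.1 name then st
    else (PySem.Set.add st.1 name,
      st.2 ++ [name ++ ", " ++ pyReprStrList (PySem.List.slice parts (some 2) (some 3)) ++ ", "
        ++ PySem.Str.join ", " (PySem.List.slice parts (some 3) none)]))
    (PySem.Set.empty, [])).2

-- ===== PRECONDITION & SPEC =====
def Spec_list_all_times_checked_in (attendData : List String) (out : List String) : Prop := out = list_all_times_checked_in_alt attendData
instance (attendData : List String) (out : List String) : Decidable (Spec_list_all_times_checked_in attendData out) := by unfold Spec_list_all_times_checked_in; infer_instance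

-- ===== CLAIM (what is proved, stated in full; the proofs are below) =====
def Claim_equal_list_all_times_checked_in : Prop := ∀ (attendData : List String), Dom_list_all_times_checked_in attendData → Spec_list_all_times_checked_in attendData (list_all_times_checked_in attendData)

-- ===== LEMMAS AND PROOFS =====

-- The per-line pieces both programs extract from a swipe line.
def pvParts (s : String) : List String := (PySem.Str.split? s ", ").getD []
def pvName (s : String) : String := PySem.Str.join ", " (PySem.List.slice (pvParts s) none (some 2))
def pvTs (s : String) : List String := PySem.List.slice (pvParts s) (some 2) (some 3)
def pvDate (s : String) : String := PySem.Str.join ", " (PySem.List.slice (pvParts s) (some 3) none)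
def pvFmt (s : String) : String :=
  pvName s ++ ", " ++ pyReprStrList (pvTs s) ++ ", " ++ pvDate s

-- Common reference: the first-swipe lines, front to back, with a seen-names list.
def pvSpecRun (seen : List String) : List String → List String
  | [] => []
  | x :: xs =>
    if pvName x ∈ seen then pvSpecRun seen xs
    else pvFmt x :: pvSpecRun (seen ++ [pvName x]) xs

-- What A's index-collection loop emits, relative to start counter c.
def pvIdxs (found : List String) (c : Nat) : List String → List Int
  | [] => []
  | n :: ns => if n ∈ found then pvIdxs found (c+1) ns else (c : Int) :: pvIdxs (found ++ [n]) (c+1) ns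

def pvFoundRun (found : List String) : List String → List String
  | [] => found
  | n :: ns => if n ∈ found then pvFoundRun found ns else pvFoundRun (found ++ [n]) ns

-- A's index-collection loop body, named for the proofs (defeq to the port's lambda).
def pvStepA (st : List Int × List String × Int) (name : String) : List Int × List String × Int :=
  if name ∈ st.2.1 then (st.1, st.2.1, st.2.2 + 1)
  else (st.1 ++ [st.2.2], st.2.1 ++ [name], st.2.2 + 1)

theorem pvStepA_mk (idxs : List Int) (found : List String) (c : Int) (n : String) :
    pvStepA (idxs, found, c) n
      = if n ∈ found then (idxs, found, c + 1) else (idxs ++ [c], found ++ [n], c + 1) := rfl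

theorem pv_midloop (ns : List String) (idxs : List Int) (found : List String) (c : Nat) :
    ns.foldl pvStepA (idxs, found, (c : Int))
    = (idxs ++ pvIdxs found c ns, pvFoundRun found ns, ((c + ns.length : Nat) : Int)) := by
  induction ns generalizing idxs found c with
  | nil => simp [pvIdxs, pvFoundRun]
  | cons n ns ih =>
    rw [List.foldl_cons, pvStepA_mk]
    have hc : ((c : Int) + 1) = ((c + 1 : Nat) : Int) := by push_cast; ring
    by_cases h : n ∈ found
    · rw [if_pos h, hc, ih]
      simp only [pvIdxs, pvFoundRun, if_pos h]
      refine congrArg (fun z => (idxs ++ pvIdxs found (c+1) ns, pvFoundRun found ns, z)) ?_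
      simp only [List.length_cons]; push_cast; ring
    · rw [if_neg h, hc, ih]
      simp only [pvIdxs, pvFoundRun, if_neg h, List.append_assoc, List.singleton_append]
      refine congrArg (fun z => (idxs ++ ((c : Int) :: pvIdxs (found ++ [n]) (c+1) ns),
        pvFoundRun (found ++ [n]) ns, z)) ?_
      simp only [List.length_cons]; push_cast; ring

theorem pv_final (full : List String) (xs found : List String) (c : Nat) (h : full.drop c = xs) :
    (pvIdxs found c (xs.map pvName)).map (fun i =>
        PySem.List.pyGetD (full.map pvName) i ""
          ++ ", " ++ pyReprStrList (PySem.List.pyGetD (full.map pvTs) i [])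
          ++ ", " ++ PySem.List.pyGetD (full.map pvDate) i "")
    = pvSpecRun found xs := by
  induction xs generalizing found c with
  | nil => simp [pvIdxs, pvSpecRun]
  | cons x xs ih =>
    have hx : full[c]? = some x := by
      have h0 : (full.drop c)[0]? = some x := by rw [h]; rfl
      rw [List.getElem?_drop] at h0
      simpa using h0
    have hdrop : full.drop (c + 1) = xs := by
      have h1 : (full.drop c).drop 1 = full.drop (c + 1) := by rw [List.drop_drop]
      rw [← h1, h]
      rfl
    have hget : ∀ {β : Type} (f : String → β) (d : β),
        PySem.List.pyGetD (full.map f) (c : Int) d = f x := by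
      intro β f d
      rw [PySem.List.pyGetD_natCast, List.getD_eq_getElem?_getD, List.getElem?_map, hx]
      rfl
    simp only [List.map_cons, pvIdxs, pvSpecRun]
    by_cases hmem : pvName x ∈ found
    · rw [if_pos hmem, if_pos hmem, ih found (c + 1) hdrop]
    · rw [if_neg hmem, if_neg hmem, List.map_cons, ih (found ++ [pvName x]) (c + 1) hdrop,
        hget pvName "", hget pvTs [], hget pvDate ""]
      rfl

-- B's loop body, named for the proofs.
def pvStepB (st : PySem.Set String × List String) (line : String) : PySem.Set String × List String :=
  if pvName line ∈ st.1 then st else (st.1 ++ [pvName line], st.2 ++ [pvFmt line])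

-- The port's lambda computes pvStepB (set membership/add unfolded to the list forms).
theorem pvStepB_eq :
    (fun (st : PySem.Set String × List String) line =>
      let parts := (PySem.Str.split? line ", ").getD []
      let name := PySem.Str.join ", " (PySem.List.slice parts none (some 2))
      if PySem.Set.contains st.1 name then st
      else (PySem.Set.add st.1 name,
        st.2 ++ [name ++ ", " ++ pyReprStrList (PySem.List.slice parts (some 2) (some 3)) ++ ", "
          ++ PySem.Str.join ", " (PySem.List.slice parts (some 3) none)]))
    = pvStepB := by
  funext st line
  show (if PySem.Set.contains st.1 (pvName line) then st
        else (PySem.Set.add st.1 (pvName line), st.2 ++ [pvFmt line])) = pvStepB st line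
  unfold pvStepB PySem.Set.add
  by_cases h : pvName line ∈ st.1
  · rw [(PySem.Set.contains_iff st.1 (pvName line)).mpr h]
    simp [h]
  · have hc : PySem.Set.contains st.1 (pvName line) = false := by
      rw [← Bool.not_eq_true, PySem.Set.contains_iff]; exact h
    rw [hc]
    simp [h]

theorem pv_altloop (xs : List String) (seen : PySem.Set String) (acc : List String) :
    xs.foldl pvStepB (seen, acc)
    = (pvFoundRun seen (xs.map pvName), acc ++ pvSpecRun seen xs) := by
  induction xs generalizing seen acc with
  | nil => simp [pvFoundRun, pvSpecRun]
  | cons x xs ih =>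
    rw [List.foldl_cons, show pvStepB (seen, acc) x
      = if pvName x ∈ seen then (seen, acc) else (seen ++ [pvName x], acc ++ [pvFmt x]) from rfl]
    simp only [List.map_cons, pvFoundRun, pvSpecRun]
    by_cases hmem : pvName x ∈ seen
    · rw [if_pos hmem, if_pos hmem, if_pos hmem, ih]
    · rw [if_neg hmem, if_neg hmem, if_neg hmem, ih]
      simp

-- ===== VERDICT (by name: the statement is the Claim_ definition above) =====
theorem list_all_times_checked_in_spec : Claim_equal_list_all_times_checked_in := by
  intro attendData _
  unfold Spec_list_all_times_checked_in
  unfold list_all_times_checked_in list_all_times_checked_in_alt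
  rw [pvStepB_eq, pv_altloop]
  simp only [PySem.List.foldl_append_singleton_eq_map, List.nil_append]
  rw [show (fun names => PySem.Str.join ", " (PySem.List.slice ((PySem.Str.split? names ", ").getD []) none (some 2))) = pvName from rfl,
      show (fun timestamps => PySem.List.slice ((PySem.Str.split? timestamps ", ").getD []) (some 2) (some 3)) = pvTs from rfl,
      show (fun dates => PySem.Str.join ", " (PySem.List.slice ((PySem.Str.split? dates ", ").getD []) (some 3) none)) = pvDate from rfl,
      show (fun (st : List Int × List String × Int) name =>
        if name ∈ st.2.1 then (st.1, st.2.1, st.2.2 + 1)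
        else (st.1 ++ [st.2.2], st.2.1 ++ [name], st.2.2 + 1)) = pvStepA from rfl,
      show ((0 : Int)) = ((0 : Nat) : Int) from rfl,
      pv_midloop]
  simp only [List.nil_append]
  exact pv_final attendData attendData [] 0 (by simp)
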